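-- pv_equiv track=rewrite | github.com/anupeesay10/PythonPractice | hw6_sum_p2.py | sum_of_n_range
-- ===== SOURCE A (Python) =====
-- def sum_of_n_range(n):
--     sum_n=0
--     prev=0
--     t=1
--     for i in range (1,n+1):
--         if i%2==0:
--             sum_n=sum_n+(prev+1)
--         else:
--             prev=3*(t-1)+1
--             sum_n=sum_n+prev
--             t=t+1
--     return sum_n
-- ===== SOURCE B (Python) =====
-- def sum_of_n_range(n):
--     # closed form: sum of first n naturals not divisible by 3
--     if n <= 0:
--         return 0
--     q, r = divmod(n, 2)
--     return 3 * q * q + r * (3 * q + 1)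
-- ===== Notes on version B (the rewrite author's own statement) =====
-- stated objective: faster
-- what changed: Replaced the O(n) loop carrying (sum, prev, t) state by the O(1) closed-form formula 3*q^2 + r*(3*q+1) with q, r = divmod(n, 2) for the sum of the first n naturals not divisible by 3.
import Mathlib
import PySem

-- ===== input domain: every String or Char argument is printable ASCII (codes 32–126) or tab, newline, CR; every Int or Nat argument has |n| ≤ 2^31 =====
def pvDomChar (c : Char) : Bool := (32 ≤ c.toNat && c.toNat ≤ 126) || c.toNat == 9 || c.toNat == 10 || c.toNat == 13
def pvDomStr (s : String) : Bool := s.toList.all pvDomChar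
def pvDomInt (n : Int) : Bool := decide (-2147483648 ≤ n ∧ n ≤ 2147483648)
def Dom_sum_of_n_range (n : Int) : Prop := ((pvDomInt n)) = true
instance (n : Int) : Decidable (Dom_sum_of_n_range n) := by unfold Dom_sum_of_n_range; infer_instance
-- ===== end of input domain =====

-- B replaces A's O(n) loop with the O(1) closed-form sum of the first n naturals not divisible by 3.

-- ===== PORT A =====
-- one loop iteration: state (sum_n, prev, t), loop variable i
def sumStepA (st : Int × Int × Int) (i : Int) : Int × Int × Int :=
  if PySem.Int.mod i 2 = 0 then (st.1 + (st.2.1 + 1), st.2.1, st.2.2)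
  else
    let prev := 3 * (st.2.2 - 1) + 1
    (st.1 + prev, prev, st.2.2 + 1)

def sum_of_n_range (n : Int) : Int :=
  ((PySem.List.pyRange 1 (n + 1) 1).foldl sumStepA (0, 0, 1)).1

-- ===== PORT B =====
def sum_of_n_range_alt (n : Int) : Int :=
  if n ≤ 0 then 0
  else
    let q := PySem.Int.floordiv n 2
    let r := PySem.Int.mod n 2
    3 * q * q + r * (3 * q + 1)

-- ===== PRECONDITION & SPEC =====
def Spec_sum_of_n_range (n : Int) (out : Int) : Prop := out = sum_of_n_range_alt n
instance (n : Int) (out : Int) : Decidable (Spec_sum_of_n_range n out) := by unfold Spec_sum_of_n_range; infer_instance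

-- ===== CLAIM (what is proved, stated in full; the proofs are below) =====
def Claim_equal_sum_of_n_range : Prop := ∀ (n : Int), Dom_sum_of_n_range n → Spec_sum_of_n_range n (sum_of_n_range n)

-- ===== LEMMAS AND PROOFS =====

-- loop invariant, stated for an even (2*j) and an odd (2*j+1) number of iterations at once
theorem sumLoopA (j : Nat) :
    (PySem.List.pyRange 1 (2 * (j : Int) + 1) 1).foldl sumStepA (0, 0, 1) =
      (3 * (j : Int) * (j : Int), if j = 0 then 0 else 3 * (j : Int) - 2, (j : Int) + 1)
    ∧ (PySem.List.pyRange 1 (2 * (j : Int) + 2) 1).foldl sumStepA (0, 0, 1) =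
      (3 * (j : Int) * (j : Int) + 3 * (j : Int) + 1, 3 * (j : Int) + 1, (j : Int) + 2) := by
  induction j with
  | zero => constructor <;> decide
  | succ k ih =>
      have heven : (PySem.List.pyRange 1 (2 * ((k + 1 : Nat) : Int) + 1) 1).foldl
          sumStepA (0, 0, 1) =
          (3 * ((k + 1 : Nat) : Int) * ((k + 1 : Nat) : Int),
           if (k + 1 : Nat) = 0 then 0 else 3 * ((k + 1 : Nat) : Int) - 2,
           ((k + 1 : Nat) : Int) + 1) := by
        have hsplit : PySem.List.pyRange 1 (2 * ((k + 1 : Nat) : Int) + 1) 1 =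
            PySem.List.pyRange 1 (2 * (k : Int) + 2) 1 ++ [2 * (k : Int) + 2] := by
          have h1 : (1 : Int) ≤ 2 * (k : Int) + 2 := by omega
          have he : 2 * ((k + 1 : Nat) : Int) + 1 = (2 * (k : Int) + 2) + 1 := by
            push_cast; ring
          rw [he]
          exact PySem.List.pyRange_one_succ_right h1
        have hmod : PySem.Int.mod (2 * (k : Int) + 2) 2 = 0 := by
          rw [PySem.Int.mod_eq_emod_of_pos (by norm_num)]; omega
        rw [hsplit, List.foldl_append, ih.2]
        simp only [List.foldl, sumStepA, hmod,
          if_neg (Nat.succ_ne_zero k)]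
        refine Prod.ext ?_ (Prod.ext ?_ ?_) <;> push_cast <;> ring
      refine ⟨heven, ?_⟩
      have hsplit : PySem.List.pyRange 1 (2 * ((k + 1 : Nat) : Int) + 2) 1 =
          PySem.List.pyRange 1 (2 * ((k + 1 : Nat) : Int) + 1) 1 ++
            [2 * ((k + 1 : Nat) : Int) + 1] := by
        have h1 : (1 : Int) ≤ 2 * ((k + 1 : Nat) : Int) + 1 := by push_cast; omega
        exact PySem.List.pyRange_one_succ_right h1
      have hmod : PySem.Int.mod (2 * ((k + 1 : Nat) : Int) + 1) 2 = 1 := by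
        rw [PySem.Int.mod_eq_emod_of_pos (by norm_num)]; omega
      rw [hsplit, List.foldl_append, heven]
      simp only [List.foldl, sumStepA, hmod, if_neg (Nat.succ_ne_zero k),
        if_neg (by norm_num : (1 : Int) ≠ 0)]
      refine Prod.ext ?_ (Prod.ext ?_ ?_) <;> push_cast <;> ring

theorem sum_of_n_range_eq_alt (n : Int) : sum_of_n_range n = sum_of_n_range_alt n := by
  by_cases h : n ≤ 0
  · simp [sum_of_n_range, sum_of_n_range_alt, h,
      PySem.List.pyRange_one_eq_nil (by omega : n + 1 ≤ 1)]
  · rcases Int.even_or_odd n with ⟨j, hj⟩ | ⟨j, hj⟩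
    · -- n = 2*j, j ≥ 1
      obtain ⟨m, rfl⟩ : ∃ m : Nat, j = (m : Int) := ⟨j.toNat, by omega⟩
      have hq : PySem.Int.floordiv n 2 = (m : Int) := by
        rw [PySem.Int.floordiv_eq_ediv_of_pos (by norm_num)]; omega
      have hr : PySem.Int.mod n 2 = 0 := by
        rw [PySem.Int.mod_eq_emod_of_pos (by norm_num)]; omega
      have hn1 : n + 1 = 2 * (m : Int) + 1 := by omega
      rw [sum_of_n_range, hn1, (sumLoopA m).1]
      simp only [sum_of_n_range_alt, if_neg h, hq, hr]
      ring
    · -- n = 2*j + 1, j ≥ 0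
      obtain ⟨m, rfl⟩ : ∃ m : Nat, j = (m : Int) := ⟨j.toNat, by omega⟩
      have hq : PySem.Int.floordiv n 2 = (m : Int) := by
        rw [PySem.Int.floordiv_eq_ediv_of_pos (by norm_num)]; omega
      have hr : PySem.Int.mod n 2 = 1 := by
        rw [PySem.Int.mod_eq_emod_of_pos (by norm_num)]; omega
      have hn1 : n + 1 = 2 * (m : Int) + 2 := by omega
      rw [sum_of_n_range, hn1, (sumLoopA m).2]
      simp only [sum_of_n_range_alt, if_neg h, hq, hr]
      ring

-- ===== VERDICT (by name: the statement is the Claim_ definition above) =====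
theorem sum_of_n_range_spec : Claim_equal_sum_of_n_range := by
  intro n _
  exact sum_of_n_range_eq_alt n
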